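-- pv_equiv track=rewrite | github.com/josesuarez03/TFG | backend/flask-services/src/services/chatbot/application/chat_turn_helpers.py | _merge_questions
-- ===== SOURCE A (Python) =====
-- from typing import Any, Dict, List, Tuple
--
-- SAFETY_QUESTION_HINTS = ("dificultad para respirar", "dolor de pecho", "desmayo", "fiebre", "convuls")
--
-- def _merge_questions(expert_questions: List[str], llm_questions: List[str], max_questions: int = 2) -> List[str]:
--     seen = set()
--     ordered: List[str] = []
--     for q in expert_questions + llm_questions:
--         lowered = q.lower()
--         if lowered in seen:
--             continue
--         seen.add(lowered)
--         ordered.append(q)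
--
--     safety = [q for q in ordered if any(hint in q.lower() for hint in SAFETY_QUESTION_HINTS)]
--     regular = [q for q in ordered if q not in safety]
--     return (safety + regular)[:max_questions]
-- ===== SOURCE B (Python) =====
-- from typing import List
--
-- SAFETY_QUESTION_HINTS = ("dificultad para respirar", "dolor de pecho", "desmayo", "fiebre", "convuls")
--
-- def _merge_questions(expert_questions: List[str], llm_questions: List[str], max_questions: int = 2) -> List[str]:
--     seen = set()
--     safety: List[str] = []
--     regular: List[str] = []
--     for q in expert_questions + llm_questions:
--         lowered = q.lower()
--         if lowered in seen:
--             continue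
--         seen.add(lowered)
--         if any(hint in lowered for hint in SAFETY_QUESTION_HINTS):
--             safety.append(q)
--         else:
--             regular.append(q)
--     return (safety + regular)[:max_questions]
-- ===== Notes on version B (the rewrite author's own statement) =====
-- stated objective: simpler
-- what changed: Replaced A's dedup loop plus two separate filtering comprehensions (the second re-scanning the safety list per element) with one loop that deduplicates and classifies each question into a safety or regular accumulator as it is first seen.
import Mathlib
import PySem

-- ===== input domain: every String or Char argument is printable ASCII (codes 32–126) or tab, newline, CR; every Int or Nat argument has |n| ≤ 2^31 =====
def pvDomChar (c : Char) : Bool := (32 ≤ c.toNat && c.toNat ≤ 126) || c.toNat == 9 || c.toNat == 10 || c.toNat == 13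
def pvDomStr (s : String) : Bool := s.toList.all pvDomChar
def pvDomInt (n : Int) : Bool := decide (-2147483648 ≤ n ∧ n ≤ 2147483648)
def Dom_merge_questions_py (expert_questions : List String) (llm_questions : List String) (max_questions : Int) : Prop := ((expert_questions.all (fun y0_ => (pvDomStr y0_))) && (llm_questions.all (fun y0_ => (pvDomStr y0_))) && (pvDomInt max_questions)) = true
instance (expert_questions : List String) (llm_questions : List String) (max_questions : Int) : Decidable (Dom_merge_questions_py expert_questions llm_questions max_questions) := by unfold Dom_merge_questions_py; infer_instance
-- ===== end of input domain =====

-- B merges A's dedup loop and its two filtering passes into one loop with two accumulators (simpler; same return value).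

-- SAFETY_QUESTION_HINTS
def pvHints : List String := ["dificultad para respirar", "dolor de pecho", "desmayo", "fiebre", "convuls"]

-- any(hint in <lowered> for hint in SAFETY_QUESTION_HINTS)
def pvIsSafe (q : String) : Bool := pvHints.any (fun h => PySem.Str.isIn h (PySem.Str.lower q))

-- ===== PORT A =====
-- the body of A's dedup loop
def pvStepA (st : PySem.Set String × List String) (q : String) : PySem.Set String × List String :=
  let lowered := PySem.Str.lower q
  if PySem.Set.contains st.1 lowered then st
  else (PySem.Set.add st.1 lowered, st.2 ++ [q])

def merge_questions_py (expert_questions : List String) (llm_questions : List String) (max_questions : Int) : List String :=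
  let r := (expert_questions ++ llm_questions).foldl pvStepA (PySem.Set.empty, [])
  let ordered := r.2
  let safety := ordered.filter (fun q => pvIsSafe q)
  let regular := ordered.filter (fun q => !(safety.contains q))
  PySem.List.slice (safety ++ regular) none (some max_questions)

-- ===== PORT B =====
-- the body of B's single classify-as-seen loop
def pvStepB (st : PySem.Set String × List String × List String) (q : String) : PySem.Set String × List String × List String :=
  let lowered := PySem.Str.lower q
  if PySem.Set.contains st.1 lowered then st
  else if pvHints.any (fun h => PySem.Str.isIn h lowered) then
    (PySem.Set.add st.1 lowered, st.2.1 ++ [q], st.2.2)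
  else
    (PySem.Set.add st.1 lowered, st.2.1, st.2.2 ++ [q])

def merge_questions_py_alt (expert_questions : List String) (llm_questions : List String) (max_questions : Int) : List String :=
  let r := (expert_questions ++ llm_questions).foldl pvStepB (PySem.Set.empty, [], [])
  PySem.List.slice (r.2.1 ++ r.2.2) none (some max_questions)

-- ===== PRECONDITION & SPEC =====
def Spec_merge_questions_py (expert_questions : List String) (llm_questions : List String) (max_questions : Int) (out : List String) : Prop := out = merge_questions_py_alt expert_questions llm_questions max_questions
instance (expert_questions : List String) (llm_questions : List String) (max_questions : Int) (out : List String) : Decidable (Spec_merge_questions_py expert_questions llm_questions max_questions out) := by unfold Spec_merge_questions_py; infer_instance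

-- ===== CLAIM (what is proved, stated in full; the proofs are below) =====
def Claim_equal_merge_questions_py : Prop := ∀ (expert_questions : List String) (llm_questions : List String) (max_questions : Int), Dom_merge_questions_py expert_questions llm_questions max_questions → Spec_merge_questions_py expert_questions llm_questions max_questions (merge_questions_py expert_questions llm_questions max_questions)

-- ===== LEMMAS AND PROOFS =====

-- A's dedup fold: the seen set is independent of the ordered accumulator, which only appends
theorem pv_foldA_acc (xs : List String) (seen : PySem.Set String) (acc : List String) :
    xs.foldl pvStepA (seen, acc) =
      ((xs.foldl pvStepA (seen, [])).1, acc ++ (xs.foldl pvStepA (seen, [])).2) := by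
  induction xs generalizing seen acc with
  | nil => simp
  | cons x xs ih =>
    by_cases h : PySem.Str.lower x ∈ seen
    · have e : ∀ acc' : List String, pvStepA (seen, acc') x = (seen, acc') := by
        intro acc'; simp [pvStepA, h]
      rw [List.foldl_cons, List.foldl_cons, e, e, ih]
    · have e : ∀ acc' : List String,
          pvStepA (seen, acc') x = (PySem.Set.add seen (PySem.Str.lower x), acc' ++ [x]) := by
        intro acc'; simp [pvStepA, h]
      rw [List.foldl_cons, List.foldl_cons, e, e,
        ih _ (acc ++ [x]), ih _ ([] ++ [x])]
      simp

-- B's fold computes the same partition as filtering A's deduped list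
theorem pv_foldB (xs : List String) (seen : PySem.Set String) (sa ra : List String) :
    xs.foldl pvStepB (seen, sa, ra) =
      ((xs.foldl pvStepA (seen, [])).1,
       sa ++ ((xs.foldl pvStepA (seen, [])).2).filter (fun q => pvIsSafe q),
       ra ++ ((xs.foldl pvStepA (seen, [])).2).filter (fun q => !pvIsSafe q)) := by
  induction xs generalizing seen sa ra with
  | nil => simp
  | cons x xs ih =>
    by_cases h : PySem.Str.lower x ∈ seen
    · have eB : pvStepB (seen, sa, ra) x = (seen, sa, ra) := by simp [pvStepB, h]
      have eA : pvStepA (seen, ([] : List String)) x = (seen, []) := by simp [pvStepA, h]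
      rw [List.foldl_cons, List.foldl_cons, eB, eA, ih]
    · have eA : pvStepA (seen, ([] : List String)) x =
          (PySem.Set.add seen (PySem.Str.lower x), [] ++ [x]) := by
        simp [pvStepA, h]
      by_cases hs : pvIsSafe x = true
      · have eB : pvStepB (seen, sa, ra) x =
            (PySem.Set.add seen (PySem.Str.lower x), sa ++ [x], ra) := by
          have hex : ∃ x1 ∈ pvHints, PySem.Chars.isIn x1.toList (PySem.Chars.lower x.toList) = true := by
            simpa [pvIsSafe] using hs
          simp [pvStepB, h, hex]
        rw [List.foldl_cons, List.foldl_cons, eB, eA,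
          pv_foldA_acc xs _ ([] ++ [x]), ih]
        simp [hs]
      · have hs' : pvIsSafe x = false := by simpa using hs
        have eB : pvStepB (seen, sa, ra) x =
            (PySem.Set.add seen (PySem.Str.lower x), sa, ra ++ [x]) := by
          have hex : ¬ ∃ x1 ∈ pvHints, PySem.Chars.isIn x1.toList (PySem.Chars.lower x.toList) = true := by
            simpa [pvIsSafe] using hs
          simp [pvStepB, h, hex]
        rw [List.foldl_cons, List.foldl_cons, eB, eA,
          pv_foldA_acc xs _ ([] ++ [x]), ih]
        simp [hs']

-- for q in the deduped list, membership in the safety sublist is exactly the safety test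
theorem pv_regular_filter (ordered : List String) :
    ordered.filter (fun q => !((ordered.filter (fun q' => pvIsSafe q')).contains q)) =
      ordered.filter (fun q => !pvIsSafe q) := by
  apply List.filter_congr
  intro q hq
  by_cases hs : pvIsSafe q = true
  · simp [List.mem_filter, hq, hs]
  · simp only [Bool.not_eq_true] at hs
    simp [List.mem_filter, hs]

-- ===== VERDICT (by name: the statement is the Claim_ definition above) =====
theorem merge_questions_py_spec : Claim_equal_merge_questions_py := by
  intro e l m _
  unfold Spec_merge_questions_py merge_questions_py merge_questions_py_alt
  rw [pv_foldB (e ++ l) PySem.Set.empty [] []]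
  simp only [List.nil_append]
  rw [pv_regular_filter]
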